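-- pv_equiv track=rewrite | github.com/Enkhamgalan1230/SchemaDiscovery | schema_discovery/candidates/ucc_composite.py | _looks_measure_like
-- ===== SOURCE A (Python) =====
-- def _looks_measure_like(col: str) -> bool:
--     s = str(col).strip().lower()
--     tokens = [
--         "minute", "time", "second", "day", "month", "year", "age",
--         "status", "stage", "round", "week",
--         "amount", "price", "total", "qty", "quantity", "count", "score", "rating",
--     ]
--     return any(t in s for t in tokens)
-- ===== SOURCE B (Python) =====
-- def _looks_measure_like(col: str) -> bool:
--     # Streaming multi-pattern matcher: one pass over the characters, carrying the
--     # set of token remainders still being matched (NFA simulation), instead of a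
--     # separate full substring scan per token.
--     s = str(col).strip().lower()
--     tokens = ("minute time second day month year age status stage round week "
--               "amount price total qty quantity count score rating").split()
--     active = []
--     for ch in s:
--         nxt = []
--         for rest in active + tokens:
--             if rest[0] == ch:
--                 if len(rest) == 1:
--                     return True
--                 nxt.append(rest[1:])
--         active = nxt
--     return False
-- ===== Notes on version B (the rewrite author's own statement) =====
-- stated objective: alternative
-- what changed: B replaces A's per-token full substring scans with a single left-to-right streaming pass that carries the set of token remainders still being matched (an NFA simulation of multi-pattern search).
import Mathlib
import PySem

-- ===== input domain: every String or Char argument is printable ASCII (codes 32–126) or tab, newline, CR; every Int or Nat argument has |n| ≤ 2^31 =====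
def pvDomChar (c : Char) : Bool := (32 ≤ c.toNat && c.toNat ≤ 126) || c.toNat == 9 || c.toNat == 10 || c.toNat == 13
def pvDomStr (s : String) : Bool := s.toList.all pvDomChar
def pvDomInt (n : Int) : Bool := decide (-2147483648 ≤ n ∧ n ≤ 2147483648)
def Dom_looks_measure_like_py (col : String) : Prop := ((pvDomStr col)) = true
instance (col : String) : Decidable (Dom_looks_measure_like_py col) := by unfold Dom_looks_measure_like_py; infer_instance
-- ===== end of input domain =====

-- B replaces A's per-token substring scans by a single streaming left-to-right pass carrying
-- the token remainders still being matched (NFA-style multi-pattern search); same result.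

-- ===== PORT A =====
def looks_measure_like_py (col : String) : Bool :=
  let s := PySem.Str.lower (PySem.Str.strip col)
  let tokens : List String :=
    ["minute", "time", "second", "day", "month", "year", "age",
     "status", "stage", "round", "week",
     "amount", "price", "total", "qty", "quantity", "count", "score", "rating"]
  tokens.any (fun t => PySem.Str.isIn t s)

-- ===== PORT B =====
-- inner loop `for rest in active + tokens: …` with its early `return True`:
-- `none` = the early return (some token matched to its end); the `[]` branch is
-- unreachable (every remainder kept is nonempty) and only makes the match total.
def lmAdvance : List (List Char) → Char → Option (List (List Char))
  | [], _ => some []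
  | r :: rs, ch =>
    match r with
    | [] => lmAdvance rs ch
    | c :: rest =>
      if c = ch then
        if rest = [] then none
        else
          match lmAdvance rs ch with
          | none => none
          | some nxt => some (rest :: nxt)
      else lmAdvance rs ch

-- one iteration of the outer `for ch in s` loop (state `none` = already returned True)
def lmStep (tokens : List (List Char)) (st : Option (List (List Char))) (ch : Char) :
    Option (List (List Char)) :=
  match st with
  | none => none
  | some active => lmAdvance (active ++ tokens) ch

def looks_measure_like_py_alt (col : String) : Bool :=
  let l := (PySem.Str.lower (PySem.Str.strip col)).toList
  let tokens : List (List Char) :=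
    (PySem.Str.split₀ ("minute time second day month year age status stage round week " ++
       "amount price total qty quantity count score rating")).map String.toList
  (l.foldl (lmStep tokens) (some [])).isNone

-- ===== PRECONDITION & SPEC =====
def Spec_looks_measure_like_py (col : String) (out : Bool) : Prop := out = looks_measure_like_py_alt col
instance (col : String) (out : Bool) : Decidable (Spec_looks_measure_like_py col out) := by unfold Spec_looks_measure_like_py; infer_instance

-- ===== CLAIM (what is proved, stated in full; the proofs are below) =====
def Claim_equal_looks_measure_like_py : Prop := ∀ (col : String), Dom_looks_measure_like_py col → Spec_looks_measure_like_py col (looks_measure_like_py col)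

-- ===== LEMMAS AND PROOFS =====

-- lmAdvance returns none exactly when some remainder is the single character ch
theorem lmAdvance_eq_none_iff (rs : List (List Char)) (ch : Char) :
    lmAdvance rs ch = none ↔ [ch] ∈ rs := by
  induction rs with
  | nil => simp [lmAdvance]
  | cons r rs ih =>
    match r with
    | [] => simp [lmAdvance, ih]
    | c :: rest =>
      by_cases hc : c = ch
      · by_cases hr : rest = []
        · subst hc hr; simp [lmAdvance]
        · rw [lmAdvance, if_pos hc, if_neg hr]
          cases h : lmAdvance rs ch with
          | none => simp [List.mem_cons, ih.mp h]
          | some nxt =>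
            have hn : ¬ [ch] ∈ rs := fun hm => by rw [ih.mpr hm] at h; cases h
            simp only [List.mem_cons, reduceCtorEq, false_iff]
            rintro (he | hm)
            · exact hr (List.tail_eq_of_cons_eq he.symm)
            · exact hn hm
      · rw [lmAdvance, if_neg hc]
        rw [ih]
        simp only [List.mem_cons]
        constructor
        · exact Or.inr
        · rintro (he | h)
          · exact absurd (List.head_eq_of_cons_eq he.symm) hc
          · exact h

-- membership in the surviving remainders: r survives iff ch :: r was pending and r is nonempty
theorem lmAdvance_mem (rs : List (List Char)) (ch : Char) (nxt : List (List Char))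
    (h : lmAdvance rs ch = some nxt) (r : List Char) :
    r ∈ nxt ↔ (ch :: r) ∈ rs ∧ r ≠ [] := by
  induction rs generalizing nxt with
  | nil => rw [lmAdvance] at h; injection h with h; subst h; simp
  | cons t rs ih =>
    match t with
    | [] =>
      rw [lmAdvance] at h
      simp [ih nxt h]
    | c :: rest =>
      by_cases hc : c = ch
      · by_cases hr : rest = []
        · rw [lmAdvance, if_pos hc, if_pos hr] at h; cases h
        · rw [lmAdvance, if_pos hc, if_neg hr] at h
          cases h2 : lmAdvance rs ch with
          | none => rw [h2] at h; cases h
          | some nxt' =>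
            rw [h2] at h
            injection h with h; subst h
            simp only [List.mem_cons, ih nxt' h2]
            constructor
            · rintro (he | ⟨hm, hne⟩)
              · subst he; exact ⟨Or.inl (by rw [hc]), hr⟩
              · exact ⟨Or.inr hm, hne⟩
            · rintro ⟨he | hm, hne⟩
              · exact Or.inl (List.tail_eq_of_cons_eq he)
              · exact Or.inr ⟨hm, hne⟩
      · rw [lmAdvance, if_neg hc] at h
        simp only [ih nxt h, List.mem_cons]
        constructor
        · rintro ⟨hm, hne⟩; exact ⟨Or.inr hm, hne⟩
        · rintro ⟨he | hm, hne⟩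
          · exact absurd (List.head_eq_of_cons_eq he).symm hc
          · exact ⟨hm, hne⟩

-- an infix of l ++ [ch] is an infix of l, or ends exactly at the new last character
theorem infix_concat_iff (t l : List Char) (ch : Char) :
    t <:+: l ++ [ch] ↔ t <:+: l ∨ ∃ u, t = u ++ [ch] ∧ u <:+ l := by
  constructor
  · intro h
    obtain ⟨v, hp, hs⟩ := List.infix_iff_prefix_suffix.mp h
    rcases List.suffix_concat_iff.mp hs with hv | ⟨w, hv, hw⟩
    · subst hv
      left
      simpa [List.prefix_nil.mp hp] using List.nil_infix (l := l)
    · subst hv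
      rcases List.prefix_concat_iff.mp hp with hp' | hp'
      · right; exact ⟨w, hp', hw⟩
      · left; exact List.infix_iff_prefix_suffix.mpr ⟨w, hp', hw⟩
  · rintro (h | ⟨u, rfl, hu⟩)
    · exact h.trans ((List.prefix_append l [ch]).isInfix)
    · exact (List.suffix_concat_iff.mpr (Or.inr ⟨u, rfl, hu⟩)).isInfix

-- the loop invariant of B's streaming pass: the state is none exactly when some token is an
-- infix of the prefix read so far, and otherwise holds exactly the nonempty remainders of
-- tokens whose nonempty front part is a suffix of that prefix
theorem lm_invariant (TK : List (List Char)) (hTK : ∀ t ∈ TK, t ≠ []) (l : List Char) :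
    (l.foldl (lmStep TK) (some []) = none ↔ ∃ t ∈ TK, t <:+: l) ∧
    (∀ a, l.foldl (lmStep TK) (some []) = some a →
      ∀ r, r ∈ a ↔ r ≠ [] ∧ ∃ t ∈ TK, ∃ u, u ≠ [] ∧ u <:+ l ∧ t = u ++ r) := by
  induction l using List.reverseRecOn with
  | nil =>
    refine ⟨?_, ?_⟩
    · simp only [List.foldl_nil]
      constructor
      · intro h; cases h
      · rintro ⟨t, ht, hinf⟩
        exact absurd (List.infix_nil.mp hinf) (hTK t ht)
    · intro a ha r
      simp only [List.foldl_nil] at ha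
      injection ha with ha; subst ha
      simp only [List.not_mem_nil, false_iff]
      rintro ⟨hne, t, ht, u, hu, hsuf, rfl⟩
      exact hu (List.suffix_nil.mp hsuf)
  | append_singleton l ch ih =>
    rw [List.foldl_append, List.foldl_cons, List.foldl_nil]
    cases hS : l.foldl (lmStep TK) (some []) with
    | none =>
      obtain ⟨t, ht, hinf⟩ := ih.1.mp hS
      refine ⟨?_, ?_⟩
      · simp only [lmStep]
        exact iff_of_true trivial ⟨t, ht, hinf.trans (List.prefix_append l [ch]).isInfix⟩
      · intro a ha; simp only [lmStep] at ha; cases ha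
    | some a0 =>
      have hnotF : ¬ ∃ t ∈ TK, t <:+: l := fun hf => by
        rw [ih.1.mpr hf] at hS; cases hS
      have hmem := ih.2 a0 hS
      simp only [lmStep]
      refine ⟨?_, ?_⟩
      · rw [lmAdvance_eq_none_iff, List.mem_append]
        constructor
        · rintro (hin | hin)
          · obtain ⟨-, t, ht, u, hu, hsuf, heq⟩ := (hmem [ch]).mp hin
            exact ⟨t, ht, (infix_concat_iff t l ch).mpr (Or.inr ⟨u, heq, hsuf⟩)⟩
          · exact ⟨[ch], hin, (infix_concat_iff _ l ch).mpr (Or.inr ⟨[], rfl, List.nil_suffix⟩)⟩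
        · rintro ⟨t, ht, hinf⟩
          rcases (infix_concat_iff t l ch).mp hinf with h | ⟨u, rfl, hu⟩
          · exact absurd ⟨t, ht, h⟩ hnotF
          · rcases List.eq_nil_or_concat' u with rfl | ⟨w, c, rfl⟩
            · right; simpa using ht
            · left
              exact (hmem [ch]).mpr ⟨by simp, (w ++ [c]) ++ [ch], ht, w ++ [c], by simp, hu, rfl⟩
      · intro a ha r
        rw [lmAdvance_mem _ ch a ha r, List.mem_append]
        constructor
        · rintro ⟨hin | hin, hne⟩
          · obtain ⟨-, t, ht, u, hu, hsuf, heq⟩ := (hmem (ch :: r)).mp hin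
            refine ⟨hne, t, ht, u ++ [ch], by simp, ?_, by simp [heq]⟩
            exact List.suffix_concat_iff.mpr (Or.inr ⟨u, rfl, hsuf⟩)
          · exact ⟨hne, ch :: r, hin, [ch], by simp, List.suffix_concat_iff.mpr (Or.inr ⟨[], rfl, List.nil_suffix⟩), rfl⟩
        · rintro ⟨hne, t, ht, u, hu, hsuf, rfl⟩
          obtain ⟨u', rfl, hu'⟩ := (List.suffix_concat_iff.mp hsuf).resolve_left hu
          rcases List.eq_nil_or_concat' u' with rfl | ⟨w, c, rfl⟩
          · exact ⟨Or.inr (by simpa using ht), hne⟩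
          · exact ⟨Or.inl ((hmem (ch :: r)).mpr ⟨by simp, _, ht, w ++ [c], by simp, hu', by simp⟩), hne⟩

-- ===== VERDICT (by name: the statement is the Claim_ definition above) =====
set_option maxRecDepth 8192 in
theorem looks_measure_like_py_spec : Claim_equal_looks_measure_like_py := by
  intro col _
  unfold Spec_looks_measure_like_py looks_measure_like_py looks_measure_like_py_alt
  have hTKeq : (PySem.Str.split₀ ("minute time second day month year age status stage round week " ++
       "amount price total qty quantity count score rating")).map String.toList =
      (["minute", "time", "second", "day", "month", "year", "age",
        "status", "stage", "round", "week",
        "amount", "price", "total", "qty", "quantity", "count", "score", "rating"] : List String).map String.toList := by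
    decide
  rw [hTKeq]
  have hne : ∀ t ∈ (["minute", "time", "second", "day", "month", "year", "age",
        "status", "stage", "round", "week",
        "amount", "price", "total", "qty", "quantity", "count", "score", "rating"] : List String).map String.toList, t ≠ [] := by
    decide
  have hinv := lm_invariant _ hne (PySem.Str.lower (PySem.Str.strip col)).toList
  apply Bool.eq_iff_iff.mpr
  rw [Option.isNone_iff_eq_none, hinv.1, List.any_eq_true]
  constructor
  · rintro ⟨t, ht, hin⟩
    exact ⟨t.toList, List.mem_map_of_mem ht, (PySem.Str.isIn_iff_infix t _).mp hin⟩
  · rintro ⟨tl, htl, hinf⟩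
    obtain ⟨t, ht, rfl⟩ := List.mem_map.mp htl
    exact ⟨t, ht, (PySem.Str.isIn_iff_infix t _).mpr hinf⟩
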